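-- pv_equiv track=rewrite | github.com/apto-as/trinitas-agents | scripts/hooks/post-execution/quality_validator.py | _analyze_class_lengths
-- ===== SOURCE A (Python) =====
-- from typing import Dict, List, Tuple, Optional
--
-- def _analyze_class_lengths(content: str) -> List[Tuple[str, int]]:
--     """Analyze class lengths"""
--     classes = []
--     lines = content.split('\n')
--
--     current_class = None
--     class_start = 0
--     indent_level = 0
--
--     for i, line in enumerate(lines):
--         stripped = line.strip()
--         if stripped.startswith('class '):
--             if current_class:
--                 classes.append((current_class, i - class_start))
--             current_class = stripped.split('(')[0].replace('class ', '').rstrip(':')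
--             class_start = i
--             indent_level = len(line) - len(line.lstrip())
--         elif current_class and stripped and len(line) - len(line.lstrip()) <= indent_level and not line.startswith(' '):
--             classes.append((current_class, i - class_start))
--             current_class = None
--
--     if current_class:
--         classes.append((current_class, len(lines) - class_start))
--
--     return classes
-- ===== SOURCE B (Python) =====
-- from typing import List, Tuple
--
--
-- def _indent(line: str) -> int:
--     return len(line) - len(line.lstrip())
--
--
-- def _class_name(line: str) -> str:
--     return line.strip().split('(')[0].replace('class ', '').rstrip(':')
--
--
-- def _analyze_class_lengths(content: str) -> List[Tuple[str, int]]: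
--     """Analyze class lengths (index-then-rescan over each class region)."""
--     lines = content.split('\n')
--     n = len(lines)
--     starts = [(i, _class_name(line), _indent(line))
--               for i, line in enumerate(lines)
--               if line.strip().startswith('class ')]
--     result = []
--     for start, name, indent in starts:
--         end = n
--         for j, line in enumerate(lines[start + 1:], start + 1):
--             s = line.strip()
--             if s.startswith('class ') or (s and _indent(line) <= indent
--                                           and not line.startswith(' ')):
--                 end = j
--                 break
--         if name:
--             result.append((name, end - start))
--     return result
-- ===== Notes on version B (the rewrite author's own statement) =====
-- stated objective: alternative
-- what changed: Replaces A's interleaved single-pass state machine (current class / start / indent carried through one fold) by a two-phase decomposition: first collect every class-start line with its parsed name and indent, then for each start independently rescan forward for the first terminating line (next class start, or a non-blank unindented dedent line) with len(lines) as EOF fallback.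
import Mathlib
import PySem

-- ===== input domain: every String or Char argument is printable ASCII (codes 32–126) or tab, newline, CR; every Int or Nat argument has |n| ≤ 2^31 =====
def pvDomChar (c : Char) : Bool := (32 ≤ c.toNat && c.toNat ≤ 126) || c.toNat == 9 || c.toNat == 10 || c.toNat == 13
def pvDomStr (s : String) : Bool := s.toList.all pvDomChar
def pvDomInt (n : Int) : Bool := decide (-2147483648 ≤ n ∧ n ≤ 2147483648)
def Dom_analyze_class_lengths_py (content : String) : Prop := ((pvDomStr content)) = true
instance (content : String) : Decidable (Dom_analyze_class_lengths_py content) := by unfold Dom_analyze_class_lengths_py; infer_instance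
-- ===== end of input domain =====

-- B replaces A's single-pass class-tracking state machine by an index-then-rescan decomposition
-- (collect all class-start lines first, then scan each region for its terminating line); alternative, not faster.

-- ===== PORT A =====
-- per-line atoms (both Pythons parse a line with literally the same expressions)
-- line.strip().startswith('class ')
def pvIsClass (l : List Char) : Bool :=
  PySem.Chars.startswith (PySem.Chars.strip l) ("class ".toList)

-- hand port of s.rstrip(':') (PySem has no right-only strip with a char set); exact:
-- it removes precisely the maximal trailing run of ':' characters, as Python does
def pvRstripColon (cs : List Char) : List Char := (cs.reverse.dropWhile (· == ':')).reverse

-- stripped.split('(')[0].replace('class ', '').rstrip(':')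
def pvName (l : List Char) : List Char :=
  pvRstripColon (PySem.Chars.replace
    ((PySem.Chars.splitOn (PySem.Chars.strip l) ['(']).headD []) ("class ".toList) [])

-- len(line) - len(line.lstrip())
def pvIndent (l : List Char) : Int :=
  (l.length : Int) - ((PySem.Chars.lstrip l).length : Int)

-- stripped and (len(line) - len(line.lstrip())) <= ind and not line.startswith(' ')
def pvCloses (ind : Int) (l : List Char) : Bool :=
  !(PySem.Chars.strip l).isEmpty && decide (pvIndent l ≤ ind)
    && !(PySem.Chars.startswith l [' '])

-- Python truthiness of current_class (None and '' are falsy)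
def pvTruthy (c : Option (List Char)) : Bool := match c with | some s => !s.isEmpty | none => false

-- one iteration of A's for-loop; state = (classes, current_class, class_start, indent_level)
def aStep (st : List (String × Int) × Option (List Char) × Int × Int)
    (p : Int × List Char) : List (String × Int) × Option (List Char) × Int × Int :=
  match st, p with
  | (classes, currentClass, classStart, indentLevel), (i, line) =>
    if pvIsClass line then
      let classes := if pvTruthy currentClass then
          classes ++ [(String.ofList (currentClass.getD []), i - classStart)] else classes
      (classes, some (pvName line), i, pvIndent line)
    else if pvTruthy currentClass && pvCloses indentLevel line then
      (classes ++ [(String.ofList (currentClass.getD []), i - classStart)], none, classStart, indentLevel)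
    else
      (classes, currentClass, classStart, indentLevel)

def analyze_class_lengths_py (content : String) : List (String × Int) :=
  let lines := PySem.Chars.splitOn content.toList ['\n']
  match (PySem.List.enumerate lines).foldl aStep ([], none, 0, 0) with
  | (classes, currentClass, classStart, _) =>
    if pvTruthy currentClass then
      classes ++ [(String.ofList (currentClass.getD []), (lines.length : Int) - classStart)]
    else classes

-- ===== PORT B =====
-- Source B's inner scan: the first j > start whose line starts a class or terminates the
-- region (for j, line in enumerate(lines[start+1:], start+1): … break), else len(lines)
def bEnd (lines : List (List Char)) (start ind : Int) : Int :=
  match (PySem.List.enumerate (PySem.List.slice lines (some (start + 1)) none) (start + 1)).find?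
      (fun p => pvIsClass p.2 || pvCloses ind p.2) with
  | some p => p.1
  | none => (lines.length : Int)

def analyze_class_lengths_py_alt (content : String) : List (String × Int) :=
  let lines := PySem.Chars.splitOn content.toList ['\n']
  let starts := (PySem.List.enumerate lines).filterMap
    (fun p => if pvIsClass p.2 then some (p.1, pvName p.2, pvIndent p.2) else none)
  starts.foldl (fun res t =>
    if t.2.1 ≠ [] then res ++ [(String.ofList t.2.1, bEnd lines t.1 t.2.2 - t.1)] else res) []

-- ===== PRECONDITION & SPEC =====
def Spec_analyze_class_lengths_py (content : String) (out : List (String × Int)) : Prop := out = analyze_class_lengths_py_alt content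
instance (content : String) (out : List (String × Int)) : Decidable (Spec_analyze_class_lengths_py content out) := by unfold Spec_analyze_class_lengths_py; infer_instance

-- ===== CLAIM (what is proved, stated in full; the proofs are below) =====
def Claim_equal_analyze_class_lengths_py : Prop := ∀ (content : String), Dom_analyze_class_lengths_py content → Spec_analyze_class_lengths_py content (analyze_class_lengths_py content)

-- ===== LEMMAS AND PROOFS =====

-- index of the first line of `rest` (whose head has index j) that ends an open region, else n
def findEndR (j : Int) (rest : List (List Char)) (ind n : Int) : Int :=
  match rest with
  | [] => n
  | l :: rs => if pvIsClass l || pvCloses ind l then j else findEndR (j + 1) rs ind n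

-- common normal form: the contributions of all class-start lines of `rest` (head index i)
def bFrom (i : Int) (rest : List (List Char)) (n : Int) : List (String × Int) :=
  match rest with
  | [] => []
  | l :: rs =>
    (if pvIsClass l then
       (if pvName l ≠ [] then [(String.ofList (pvName l), findEndR (i + 1) rs (pvIndent l) n - i)] else [])
     else []) ++ bFrom (i + 1) rs n

-- A's epilogue (the trailing 'if current_class: classes.append(...)')
def pvFinalize (n : Int) (st : List (String × Int) × Option (List Char) × Int × Int) :
    List (String × Int) :=
  match st with
  | (classes, currentClass, classStart, _) =>
    if pvTruthy currentClass then
      classes ++ [(String.ofList (currentClass.getD []), n - classStart)]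
    else classes

-- characterization of A's loop: whatever state it is in, the finalized result is the
-- accumulator, then the segment of the open class (ending at the first terminating line,
-- or n), then the contributions of all later class starts
lemma aLoop_char (rest : List (List Char)) : ∀ (i : Int) (acc : List (String × Int))
    (cur : Option (List Char)) (s ind n : Int),
    pvFinalize n ((PySem.List.enumerate rest i).foldl aStep (acc, cur, s, ind))
      = acc ++ (if pvTruthy cur then [(String.ofList (cur.getD []), findEndR i rest ind n - s)] else [])
          ++ bFrom i rest n := by
  induction rest with
  | nil =>
    intro i acc cur s ind n
    cases cur <;> simp [PySem.List.enumerate, pvFinalize, pvTruthy, findEndR, bFrom] <;>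
      split_ifs <;> simp
  | cons l rs ih =>
    intro i acc cur s ind n
    rw [PySem.List.enumerate_cons, List.foldl_cons]
    by_cases hC : pvIsClass l
    · rw [show aStep (acc, cur, s, ind) (i, l)
          = ((if pvTruthy cur then acc ++ [(String.ofList (cur.getD []), i - s)] else acc),
             some (pvName l), i, pvIndent l) by simp [aStep, hC]]
      rw [ih]
      by_cases hN : pvName l = [] <;> by_cases hT : pvTruthy cur <;>
        simp [hC, hN, hT, findEndR, bFrom, List.append_assoc] <;> simp [pvTruthy, hN]
    · by_cases hCl : (pvTruthy cur && pvCloses ind l) = true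
      · rw [show aStep (acc, cur, s, ind) (i, l)
            = (acc ++ [(String.ofList (cur.getD []), i - s)], none, s, ind) by
              simp [aStep, hC]; simp_all]
        rw [ih]
        rcases Bool.and_eq_true .. |>.mp hCl with ⟨hT, hP⟩
        simp [hC, hT, hP, findEndR, bFrom]; simp [pvTruthy]
      · rw [show aStep (acc, cur, s, ind) (i, l) = (acc, cur, s, ind) by
              simp [aStep, hC, hCl]]
        rw [ih]
        by_cases hT : pvTruthy cur
        · have hP : pvCloses ind l = false := by
            cases hpc : pvCloses ind l <;> simp_all
          simp [hC, hT, hP, findEndR, bFrom]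
        · simp [hC, hT, bFrom]

-- B's find?-over-enumerate scan computes findEndR
lemma find?_enum_eq_findEndR (rest : List (List Char)) : ∀ (j ind n : Int),
    (match (PySem.List.enumerate rest j).find? (fun p => pvIsClass p.2 || pvCloses ind p.2) with
     | some p => p.1
     | none => n) = findEndR j rest ind n := by
  induction rest with
  | nil => intro j ind n; simp [PySem.List.enumerate, findEndR]
  | cons l rs ih =>
    intro j ind n
    rw [PySem.List.enumerate_cons]
    by_cases h : (pvIsClass l || pvCloses ind l) = true
    · simp [List.find?, h, findEndR]
    · simp [List.find?, h, findEndR, ih]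

lemma bEnd_eq (lines rs : List (List Char)) (i : Nat) (ind : Int)
    (h : lines.drop (i + 1) = rs) :
    bEnd lines (i : Int) ind = findEndR ((i : Int) + 1) rs ind (lines.length : Int) := by
  have h1 : ((i : Int) + 1) = ((i + 1 : Nat) : Int) := by push_cast; ring
  rw [bEnd, h1, PySem.List.slice_from_natCast, h, find?_enum_eq_findEndR]

-- characterization of B's loop over the collected starts of a suffix of `lines`
lemma bLoop_char (lines : List (List Char)) (rest : List (List Char)) : ∀ (i : Nat)
    (acc : List (String × Int)), lines.drop i = rest →
    ((PySem.List.enumerate rest (i : Int)).filterMap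
        (fun p => if pvIsClass p.2 then some (p.1, pvName p.2, pvIndent p.2) else none)).foldl
      (fun res t =>
        if t.2.1 ≠ [] then res ++ [(String.ofList t.2.1, bEnd lines t.1 t.2.2 - t.1)] else res) acc
      = acc ++ bFrom (i : Int) rest (lines.length : Int) := by
  induction rest with
  | nil => intro i acc _; rw [PySem.List.enumerate_nil, List.filterMap_nil, List.foldl_nil,
      show bFrom (i : Int) [] (lines.length : Int) = [] from rfl, List.append_nil]
  | cons l rs ih =>
    intro i acc h
    have h2 : lines.drop (i + 1) = rs := by
      rw [← List.tail_drop, h, List.tail_cons]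
    have hcast : (i : Int) + 1 = ((i + 1 : Nat) : Int) := by push_cast; ring
    rw [PySem.List.enumerate_cons]
    by_cases hC : pvIsClass l
    · rw [List.filterMap_cons]
      simp only [hC, if_pos]
      rw [List.foldl_cons]
      simp only []
      rw [bEnd_eq lines rs i _ h2]
      by_cases hN : pvName l = []
      · rw [if_neg (by simp [hN]), hcast, ih (i+1) acc h2]
        have hb : bFrom ((i : Int)) (l :: rs) (lines.length : Int)
            = bFrom ((i : Int) + 1) rs (lines.length : Int) := by
          rw [bFrom]; simp [hC, hN]
        rw [hb, hcast]
      · rw [if_pos (by simp [hN]), hcast,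
          ih (i+1) (acc ++ [(String.ofList (pvName l), findEndR (((i+1 : Nat)) : Int) rs (pvIndent l) (lines.length : Int) - (i:Int))]) h2]
        have hb : bFrom ((i : Int)) (l :: rs) (lines.length : Int)
            = [(String.ofList (pvName l), findEndR ((i:Int)+1) rs (pvIndent l) (lines.length : Int) - (i:Int))]
              ++ bFrom ((i : Int) + 1) rs (lines.length : Int) := by
          rw [bFrom]; simp [hC, hN]
        rw [hb, hcast]
        simp
    · rw [List.filterMap_cons]
      simp only [hC]
      rw [if_neg (by simp), hcast, ih (i+1) acc h2]
      have hb : bFrom ((i : Int)) (l :: rs) (lines.length : Int)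
          = bFrom ((i : Int) + 1) rs (lines.length : Int) := by
        rw [bFrom]; simp [hC]
      rw [hb, hcast]

-- ===== VERDICT (by name: the statement is the Claim_ definition above) =====
theorem analyze_class_lengths_py_spec : Claim_equal_analyze_class_lengths_py := by
  intro content _
  unfold Spec_analyze_class_lengths_py
  have hA : analyze_class_lengths_py content
      = [] ++ (if pvTruthy none then [(String.ofList ((none : Option (List Char)).getD []),
            findEndR 0 (PySem.Chars.splitOn content.toList ['\n'])
              0 ((PySem.Chars.splitOn content.toList ['\n']).length : Int) - 0)] else [])
        ++ bFrom 0 (PySem.Chars.splitOn content.toList ['\n'])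
            ((PySem.Chars.splitOn content.toList ['\n']).length : Int) :=
    aLoop_char _ 0 [] none 0 0 _
  have hB : analyze_class_lengths_py_alt content
      = [] ++ bFrom (((0 : Nat)) : Int) (PySem.Chars.splitOn content.toList ['\n'])
          ((PySem.Chars.splitOn content.toList ['\n']).length : Int) :=
    bLoop_char _ _ 0 [] rfl
  rw [hA, hB]
  simp [pvTruthy]
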